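-- pv_equiv track=rewrite | github.com/coelacant1/PTXEngine | scripts/UpdatePTXRegistry.py | find_comment_spans
-- ===== SOURCE A (Python) =====
-- from typing import List, Optional, Tuple, Dict, Any
--
-- def find_comment_spans(src: str) -> Tuple[List[int], List[Tuple[int, int]]]:
--     spans: List[Tuple[int, int]] = []
--     n = len(src)
--     i = 0
--     in_string = False
--     in_char = False
--
--     while i < n:
--         ch = src[i]
--         nxt = src[i + 1] if i + 1 < n else ''
--
--         if not in_string and not in_char:
--             if ch == '"':
--                 in_string = True
--                 i += 1
--                 continue
--             if ch == "'":
--                 in_char = True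
--                 i += 1
--                 continue
--             if ch == '/' and nxt == '/':
--                 start = i
--                 i = src.find('\n', i)
--                 if i == -1:
--                     spans.append((start, n))
--                     break
--                 spans.append((start, i))
--                 continue
--             if ch == '/' and nxt == '*':
--                 start = i
--                 end = src.find('*/', i + 2)
--                 if end == -1:
--                     spans.append((start, n))
--                     break
--                 spans.append((start, end + 2))
--                 i = end + 2
--                 continue
--         else:
--             if ch == '\\':
--                 i += 2
--                 continue
--             if in_string and ch == '"':
--                 in_string = False
--                 i += 1
--                 continue
--             if in_char and ch == "'":
--                 in_char = False
--                 i += 1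
--                 continue
--
--         i += 1
--
--     spans.sort()
--     starts = [s for s, _ in spans]
--     return starts, spans
-- ===== SOURCE B (Python) =====
-- def find_comment_spans(src):
--     # Explicit per-character state machine (CODE/STRING/CHAR/LINE/BLOCK) instead of find() jumps.
--     CODE, STRING, CHAR, LINE, BLOCK = 0, 1, 2, 3, 4
--     spans = []
--     n = len(src)
--     state = CODE
--     escaped = False
--     start = 0
--     i = 0
--     while i < n:
--         ch = src[i]
--         if state == CODE:
--             if ch == '"':
--                 state = STRING
--                 escaped = False
--             elif ch == "'":
--                 state = CHAR
--                 escaped = False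
--             elif ch == '/' and i + 1 < n and src[i + 1] == '/':
--                 state = LINE
--                 start = i
--                 i += 2
--                 continue
--             elif ch == '/' and i + 1 < n and src[i + 1] == '*':
--                 state = BLOCK
--                 start = i
--                 i += 2
--                 continue
--         elif state == LINE:
--             if ch == '\n':
--                 spans.append((start, i))
--                 state = CODE
--         elif state == BLOCK:
--             if ch == '*' and i + 1 < n and src[i + 1] == '/':
--                 spans.append((start, i + 2))
--                 state = CODE
--                 i += 2
--                 continue
--         else:  # STRING or CHAR
--             if escaped:
--                 escaped = False
--             elif ch == '\\':
--                 escaped = True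
--             elif state == STRING and ch == '"':
--                 state = CODE
--             elif state == CHAR and ch == "'":
--                 state = CODE
--         i += 1
--     if state == LINE or state == BLOCK:
--         spans.append((start, n))
--     spans.sort()
--     starts = [s for s, _ in spans]
--     return starts, spans
-- ===== Notes on version B (the rewrite author's own statement) =====
-- stated objective: alternative
-- what changed: Replaced the find()-jump scanner with an explicit per-character state machine (CODE/STRING/CHAR/LINE_COMMENT/BLOCK_COMMENT plus an escaped flag) that advances one character at a time and closes comments itself.
import Mathlib
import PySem

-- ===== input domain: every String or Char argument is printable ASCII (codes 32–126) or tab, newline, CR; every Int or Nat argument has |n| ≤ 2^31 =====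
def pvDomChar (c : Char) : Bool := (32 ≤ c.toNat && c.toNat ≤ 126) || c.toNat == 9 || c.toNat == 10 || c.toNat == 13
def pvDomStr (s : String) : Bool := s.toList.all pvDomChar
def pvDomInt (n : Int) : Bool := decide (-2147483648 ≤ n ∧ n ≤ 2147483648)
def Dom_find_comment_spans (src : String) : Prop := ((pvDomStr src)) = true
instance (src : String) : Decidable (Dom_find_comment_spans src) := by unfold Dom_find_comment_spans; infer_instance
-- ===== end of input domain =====

-- B replaces A's find()-jump scanner by an explicit per-character state machine (same O(n) cost).

-- ===== PORT A =====
-- Literal port of A's while loop: position i, in_string/in_char flags, find() jumps.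
-- The fuel argument only makes the jumping loop total; it is called with fuel n+1 > n - i,
-- and every iteration advances i by at least 1, so fuel never runs out.
def aLoop (cs : List Char) (n : Nat) (fuel i : Nat) (instr inchar : Bool)
    (spans : List (Int × Int)) : List (Int × Int) :=
  match fuel with
  | 0 => spans
  | fuel + 1 =>
    if i < n then
      let ch := cs.getD i ' '
      let nxt : Option Char := if i + 1 < n then some (cs.getD (i + 1) ' ') else none
      if instr = false ∧ inchar = false then
        if ch = '"' then aLoop cs n fuel (i + 1) true inchar spans
        else if ch = '\'' then aLoop cs n fuel (i + 1) instr true spans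
        else if ch = '/' ∧ nxt = some '/' then
          let j := PySem.Chars.findFrom cs ['\n'] (i : Int) none
          if j = -1 then spans ++ [((i : Int), (n : Int))]
          else aLoop cs n fuel j.toNat instr inchar (spans ++ [((i : Int), j)])
        else if ch = '/' ∧ nxt = some '*' then
          let e := PySem.Chars.findFrom cs ['*', '/'] ((i : Int) + 2) none
          if e = -1 then spans ++ [((i : Int), (n : Int))]
          else aLoop cs n fuel (e.toNat + 2) instr inchar (spans ++ [((i : Int), e + 2)])
        else aLoop cs n fuel (i + 1) instr inchar spans
      else
        if ch = '\\' then aLoop cs n fuel (i + 2) instr inchar spans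
        else if instr = true ∧ ch = '"' then aLoop cs n fuel (i + 1) false inchar spans
        else if inchar = true ∧ ch = '\'' then aLoop cs n fuel (i + 1) instr false spans
        else aLoop cs n fuel (i + 1) instr inchar spans
    else spans

def find_comment_spans (src : String) : List Int × (List (Int × Int)) :=
  let cs := src.toList
  let n := cs.length
  let spans := aLoop cs n (n + 1) 0 false false []
  let spans := PySem.List.sorted spans (fun p => p.1) false
  (spans.map (fun p => p.1), spans)

-- ===== PORT B =====
-- B's explicit state machine: CODE / STRING(escaped) / CHAR(escaped) / LINE(start) / BLOCK(start).
inductive BSt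
  | code
  | strS (esc : Bool)
  | chrS (esc : Bool)
  | line (start : Int)
  | block (start : Int)

def bGo (st : BSt) (l : List Char) (i : Int) (spans : List (Int × Int)) : List (Int × Int) :=
  match st, l with
  | .line s, [] => spans ++ [(s, i)]
  | .block s, [] => spans ++ [(s, i)]
  | _, [] => spans
  | .code, c :: rest =>
    if c = '"' then bGo (.strS false) rest (i + 1) spans
    else if c = '\'' then bGo (.chrS false) rest (i + 1) spans
    else if c = '/' then
      if rest.head? = some '/' then bGo (.line i) rest.tail (i + 2) spans
      else if rest.head? = some '*' then bGo (.block i) rest.tail (i + 2) spans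
      else bGo .code rest (i + 1) spans
    else bGo .code rest (i + 1) spans
  | .line s, c :: rest =>
    if c = '\n' then bGo .code rest (i + 1) (spans ++ [(s, i)])
    else bGo (.line s) rest (i + 1) spans
  | .block s, c :: rest =>
    if c = '*' ∧ rest.head? = some '/' then bGo .code rest.tail (i + 2) (spans ++ [(s, i + 2)])
    else bGo (.block s) rest (i + 1) spans
  | .strS esc, c :: rest =>
    if esc then bGo (.strS false) rest (i + 1) spans
    else if c = '\\' then bGo (.strS true) rest (i + 1) spans
    else if c = '"' then bGo .code rest (i + 1) spans
    else bGo (.strS false) rest (i + 1) spans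
  | .chrS esc, c :: rest =>
    if esc then bGo (.chrS false) rest (i + 1) spans
    else if c = '\\' then bGo (.chrS true) rest (i + 1) spans
    else if c = '\'' then bGo .code rest (i + 1) spans
    else bGo (.chrS false) rest (i + 1) spans
termination_by l.length
decreasing_by all_goals (simp only [List.length_cons, List.length_tail]; omega)

def find_comment_spans_alt (src : String) : List Int × (List (Int × Int)) :=
  let spans := bGo .code src.toList 0 []
  let spans := PySem.List.sorted spans (fun p => p.1) false
  (spans.map (fun p => p.1), spans)

-- ===== PRECONDITION & SPEC =====
def Spec_find_comment_spans (src : String) (out : List Int × (List (Int × Int))) : Prop := out = find_comment_spans_alt src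
instance (src : String) (out : List Int × (List (Int × Int))) : Decidable (Spec_find_comment_spans src out) := by unfold Spec_find_comment_spans; infer_instance

-- ===== CLAIM (what is proved, stated in full; the proofs are below) =====
def Claim_equal_find_comment_spans : Prop := ∀ (src : String), Dom_find_comment_spans src → Spec_find_comment_spans src (find_comment_spans src)

-- ===== LEMMAS AND PROOFS =====

theorem go_nonneg (sub l : List Char) (k : Nat) :
    PySem.Chars.find.go sub l k = -1 ∨ (k : Int) ≤ PySem.Chars.find.go sub l k := by
  induction l generalizing k with
  | nil => rw [PySem.Chars.find.go]; split <;> simp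
  | cons c l ih =>
    rw [PySem.Chars.find.go]
    split
    · simp
    · rcases ih (k + 1) with h | h
      · exact Or.inl h
      · right; omega

theorem go_shift (sub : List Char) : ∀ (l : List Char) (k : Nat),
    PySem.Chars.find.go sub l k =
      if PySem.Chars.find.go sub l 0 = -1 then -1 else PySem.Chars.find.go sub l 0 + k := by
  intro l
  induction l with
  | nil =>
    intro k
    rw [PySem.Chars.find.go, PySem.Chars.find.go]
    split <;> simp
  | cons c l ih =>
    intro k
    rw [PySem.Chars.find.go]
    conv_rhs => rw [PySem.Chars.find.go]
    split
    · simp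
    · rw [ih (k + 1), ih 1]
      rcases go_nonneg sub l 0 with h | h
      · simp [h]
      · split
        · omega
        · push_cast; omega

theorem find_cons (sub : List Char) (c : Char) (l : List Char) :
    PySem.Chars.find (c :: l) sub =
      if sub.isPrefixOf (c :: l) then 0
      else if PySem.Chars.find l sub = -1 then -1 else PySem.Chars.find l sub + 1 := by
  simp only [PySem.Chars.find]
  rw [PySem.Chars.find.go]
  split
  · simp_all
  · simp_all [go_shift sub l 1]

theorem bGo_line (l : List Char) : ∀ (s i : Int) (spans : List (Int × Int)),
    bGo (.line s) l i spans =
      if PySem.Chars.find l ['\n'] = -1 then spans ++ [(s, i + l.length)]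
      else bGo .code (l.drop (PySem.Chars.find l ['\n']).toNat)
        (i + PySem.Chars.find l ['\n'])
        (spans ++ [(s, i + PySem.Chars.find l ['\n'])]) := by
  induction l with
  | nil =>
    intro s i spans
    have hnil : PySem.Chars.find [] ['\n'] = -1 := by decide
    simp [bGo, hnil]
  | cons c l ih =>
    intro s i spans
    rw [find_cons]
    by_cases hc : c = '\n'
    · subst hc
      have hpre : (['\n'].isPrefixOf ('\n' :: l)) = true := by simp [List.isPrefixOf]
      simp [bGo, hpre]
    · have hpre : (['\n'].isPrefixOf (c :: l)) = false := by
        simp [List.isPrefixOf]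
        exact fun h => hc h.symm
      have hstep : bGo (.line s) (c :: l) i spans = bGo (.line s) l (i + 1) spans := by
        simp [bGo, hc]
      rw [hstep, ih]
      by_cases hf : PySem.Chars.find l ['\n'] = -1
      · simp [hpre, hf, List.length_cons]
        ring_nf
      · have hge : 0 ≤ PySem.Chars.find l ['\n'] := by
          have := PySem.Chars.neg_one_le_find l ['\n']
          omega
        have h1 : PySem.Chars.find l ['\n'] + 1 ≠ -1 := by omega
        have h2 : (PySem.Chars.find l ['\n'] + 1).toNat = (PySem.Chars.find l ['\n']).toNat + 1 := by
          omega
        have h3 : i + (PySem.Chars.find l ['\n'] + 1) = i + 1 + PySem.Chars.find l ['\n'] := by ring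
        simp [hpre, hf, h1, h2, h3, List.drop_succ_cons]

theorem bGo_block (l : List Char) : ∀ (s i : Int) (spans : List (Int × Int)),
    bGo (.block s) l i spans =
      if PySem.Chars.find l ['*', '/'] = -1 then spans ++ [(s, i + l.length)]
      else bGo .code (l.drop ((PySem.Chars.find l ['*', '/']).toNat + 2))
        (i + PySem.Chars.find l ['*', '/'] + 2)
        (spans ++ [(s, i + PySem.Chars.find l ['*', '/'] + 2)]) := by
  induction l with
  | nil =>
    intro s i spans
    have hnil : PySem.Chars.find [] ['*', '/'] = -1 := by decide
    simp [bGo, hnil]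
  | cons c l ih =>
    intro s i spans
    rw [find_cons]
    by_cases hcl : c = '*' ∧ l.head? = some '/'
    · obtain ⟨hc, hh⟩ := hcl
      subst hc
      rcases l with _ | ⟨c2, l2⟩
      · simp at hh
      · simp at hh
        subst hh
        have hpre : (['*', '/'].isPrefixOf ('*' :: '/' :: l2)) = true := by
          simp [List.isPrefixOf]
        simp [bGo, hpre]
    · have hpre : (['*', '/'].isPrefixOf (c :: l)) = false := by
        rcases l with _ | ⟨c2, l2⟩
        · simp [List.isPrefixOf]
        · by_contra h
          simp [List.isPrefixOf] at h
          exact hcl ⟨h.1.symm, by simp [h.2.symm]⟩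
      have hstep : bGo (.block s) (c :: l) i spans = bGo (.block s) l (i + 1) spans := by
        simp only [bGo]
        rw [if_neg hcl]
      rw [hstep, ih]
      by_cases hf : PySem.Chars.find l ['*', '/'] = -1
      · simp [hpre, hf, List.length_cons]
        ring_nf
      · have hge : 0 ≤ PySem.Chars.find l ['*', '/'] := by
          have := PySem.Chars.neg_one_le_find l ['*', '/']
          omega
        have h1 : PySem.Chars.find l ['*', '/'] + 1 ≠ -1 := by omega
        have h2 : (PySem.Chars.find l ['*', '/'] + 1).toNat + 2 =
            ((PySem.Chars.find l ['*', '/']).toNat + 2) + 1 := by omega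
        have h3 : i + (PySem.Chars.find l ['*', '/'] + 1) + 2 =
            i + 1 + PySem.Chars.find l ['*', '/'] + 2 := by ring
        simp [hpre, hf, h1, h2, h3, List.drop_succ_cons]

theorem bGo_skip_str (l : List Char) (i : Int) (spans : List (Int × Int)) :
    bGo (.strS true) l i spans = bGo (.strS false) l.tail (i + 1) spans := by
  cases l <;> simp [bGo]

theorem bGo_skip_chr (l : List Char) (i : Int) (spans : List (Int × Int)) :
    bGo (.chrS true) l i spans = bGo (.chrS false) l.tail (i + 1) spans := by
  cases l <;> simp [bGo]

theorem aLoop_eq_bGo (cs : List Char) (fuel : Nat) :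
    ∀ (i : Nat) (instr inchar : Bool) (spans : List (Int × Int)),
      ¬(instr = true ∧ inchar = true) → cs.length - i < fuel →
      aLoop cs cs.length fuel i instr inchar spans =
        bGo (if instr then .strS false else if inchar then .chrS false else .code)
          (cs.drop i) (i : Int) spans := by
  induction fuel with
  | zero => intro i instr inchar spans hst hf; omega
  | succ fuel ih =>
    intro i instr inchar spans hst hf
    by_cases hi : i < cs.length
    · have hdrop : cs.drop i = cs[i] :: cs.drop (i + 1) := List.drop_eq_getElem_cons hi
      have hch : cs.getD i ' ' = cs[i] := List.getD_eq_getElem cs ' ' hi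
      simp only [aLoop, if_pos hi, hch]
      cases instr with
      | true =>
        cases inchar with
        | true => exact absurd ⟨rfl, rfl⟩ hst
        | false =>
          rw [if_neg (by simp)]
          by_cases hb : cs[i] = '\\'
          · rw [if_pos hb, ih (i + 2) true false spans (by simp) (by omega), hdrop]
            simp only [if_true]
            have htl : (cs.drop (i + 1)).tail = cs.drop (i + 2) := by
              rw [List.tail_drop, show i + 1 + 1 = i + 2 by omega]
            rw [show ((i + 2 : Nat) : Int) = ((i : Int) + 1) + 1 by push_cast; ring]
            rw [← htl, ← bGo_skip_str]
            simp [bGo, hb, -List.getElem_cons_drop]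
          · rw [if_neg hb]
            by_cases hq : cs[i] = '"'
            · rw [if_pos ⟨rfl, hq⟩, ih (i + 1) false false spans (by simp) (by omega), hdrop]
              simp only [if_true]
              simp [bGo, hq, -List.getElem_cons_drop]
            · rw [if_neg (by simp [hq]), if_neg (by simp),
                ih (i + 1) true false spans (by simp) (by omega), hdrop]
              simp only [if_true]
              simp [bGo, hb, hq, -List.getElem_cons_drop]
      | false =>
        cases inchar with
        | true =>
          rw [if_neg (by simp)]
          by_cases hb : cs[i] = '\\'
          · rw [if_pos hb, ih (i + 2) false true spans (by simp) (by omega), hdrop]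
            simp only [if_true, Bool.false_eq_true, if_false]
            have htl : (cs.drop (i + 1)).tail = cs.drop (i + 2) := by
              rw [List.tail_drop, show i + 1 + 1 = i + 2 by omega]
            rw [show ((i + 2 : Nat) : Int) = ((i : Int) + 1) + 1 by push_cast; ring]
            rw [← htl, ← bGo_skip_chr]
            simp [bGo, hb, -List.getElem_cons_drop]
          · rw [if_neg hb, if_neg (by simp)]
            by_cases hq : cs[i] = '\''
            · rw [if_pos ⟨rfl, hq⟩, ih (i + 1) false false spans (by simp) (by omega), hdrop]
              simp only [Bool.false_eq_true, if_false]
              simp [bGo, hq, -List.getElem_cons_drop]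
            · rw [if_neg (by simp [hq]),
                ih (i + 1) false true spans (by simp) (by omega), hdrop]
              simp only [Bool.false_eq_true, if_false, if_true]
              simp [bGo, hb, hq, -List.getElem_cons_drop]
        | false =>
          rw [if_pos ⟨rfl, rfl⟩]
          simp only [Bool.false_eq_true, if_false]
          by_cases h1 : cs[i] = '"'
          · rw [if_pos h1, ih (i + 1) true false spans (by simp) (by omega), hdrop]
            simp [bGo, h1, -List.getElem_cons_drop]
          · rw [if_neg h1]
            by_cases h2 : cs[i] = '\''
            · rw [if_pos h2, ih (i + 1) false true spans (by simp) (by omega), hdrop]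
              simp [bGo, h2, -List.getElem_cons_drop]
            · rw [if_neg h2]
              by_cases h3 : cs[i] = '/'
              · by_cases h4 : i + 1 < cs.length
                · have hdrop2 : cs.drop (i + 1) = cs[i + 1] :: cs.drop (i + 2) :=
                    List.drop_eq_getElem_cons h4
                  have hch2 : cs.getD (i + 1) ' ' = cs[i + 1] := List.getD_eq_getElem cs ' ' h4
                  simp only [if_pos h4, hch2]
                  by_cases h5 : cs[i + 1] = '/'
                  · rw [if_pos ⟨h3, by rw [h5]⟩]
                    have hfind : PySem.Chars.find (cs.drop i) ['\n'] =
                        if PySem.Chars.find (cs.drop (i + 2)) ['\n'] = -1 then -1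
                        else PySem.Chars.find (cs.drop (i + 2)) ['\n'] + 2 := by
                      rw [hdrop, hdrop2, h3, h5, find_cons, find_cons]
                      have hp1 : (['\n'].isPrefixOf ('/' :: '/' :: cs.drop (i + 2))) = false := by
                        simp [List.isPrefixOf]
                      have hp2 : (['\n'].isPrefixOf ('/' :: cs.drop (i + 2))) = false := by
                        simp [List.isPrefixOf]
                      rw [hp1, hp2]
                      simp only [Bool.false_eq_true, if_false]
                      have hnb0 := PySem.Chars.neg_one_le_find (cs.drop (i + 2)) ['\n']
                      by_cases hf0 : PySem.Chars.find (cs.drop (i + 2)) ['\n'] = -1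
                      · simp [hf0]
                      · have hne : PySem.Chars.find (cs.drop (i + 2)) ['\n'] + 1 ≠ -1 := by omega
                        simp [hf0, hne]
                        omega
                    have hff : PySem.Chars.findFrom cs ['\n'] (i : Int) none =
                        if PySem.Chars.find (cs.drop i) ['\n'] = -1 then -1
                        else (i : Int) + PySem.Chars.find (cs.drop i) ['\n'] :=
                      PySem.Chars.findFrom_natCast cs ['\n'] i (by omega)
                    rw [hff, hfind]
                    have hnb := PySem.Chars.neg_one_le_find (cs.drop (i + 2)) ['\n']
                    have hfl := PySem.Chars.find_le_length (cs.drop (i + 2)) ['\n']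
                    by_cases hf : PySem.Chars.find (cs.drop (i + 2)) ['\n'] = -1
                    · rw [if_pos hf, if_pos rfl, hdrop, hdrop2, h3, h5]
                      simp [bGo, bGo_line, hf, List.length_drop, -List.getElem_cons_drop]
                      omega
                    · have hne2 : ¬(PySem.Chars.find (cs.drop (i + 2)) ['\n'] + 2 = -1) := by omega
                      rw [if_neg hf]
                      simp only [if_neg hne2]
                      have htn : ((i : Int) + (PySem.Chars.find (cs.drop (i + 2)) ['\n'] + 2)).toNat =
                          i + 2 + (PySem.Chars.find (cs.drop (i + 2)) ['\n']).toNat := by omega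
                      rw [htn, ih (i + 2 + (PySem.Chars.find (cs.drop (i + 2)) ['\n']).toNat)
                        false false _ (by simp) (by omega)]
                      rw [hdrop, hdrop2, h3, h5]
                      simp [bGo, bGo_line, hf, List.drop_drop, -List.getElem_cons_drop]
                      have hfeq : PySem.Chars.find (cs.drop (i + 2)) ['\n'] =
                          ((PySem.Chars.find (cs.drop (i + 2)) ['\n']).toNat : Int) := by omega
                      rw [hfeq]
                      ring_nf
                      rw [if_neg (by omega), max_eq_left (by omega)]
                  · rw [if_neg (by simp [h5])]
                    by_cases h6 : cs[i + 1] = '*'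
                    · rw [if_pos ⟨h3, by rw [h6]⟩]
                      have hff : PySem.Chars.findFrom cs ['*', '/'] ((i : Int) + 2) none =
                          if PySem.Chars.find (cs.drop (i + 2)) ['*', '/'] = -1 then -1
                          else ((i + 2 : Nat) : Int) + PySem.Chars.find (cs.drop (i + 2)) ['*', '/'] := by
                        rw [show ((i : Int) + 2) = ((i + 2 : Nat) : Int) by push_cast; ring]
                        exact PySem.Chars.findFrom_natCast cs ['*', '/'] (i + 2) (by omega)
                      rw [hff]
                      have hnb := PySem.Chars.neg_one_le_find (cs.drop (i + 2)) ['*', '/']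
                      by_cases hg : PySem.Chars.find (cs.drop (i + 2)) ['*', '/'] = -1
                      · rw [if_pos hg, if_pos rfl, hdrop, hdrop2, h3, h6]
                        simp [bGo, bGo_block, hg, List.length_drop, -List.getElem_cons_drop]
                        omega
                      · have hne2 : ¬(((i + 2 : Nat) : Int) + PySem.Chars.find (cs.drop (i + 2)) ['*', '/'] = -1) := by
                          push_cast
                          omega
                        rw [if_neg hg]
                        simp only [if_neg hne2]
                        have htn : (((i + 2 : Nat) : Int) + PySem.Chars.find (cs.drop (i + 2)) ['*', '/']).toNat + 2 =
                            i + 2 + ((PySem.Chars.find (cs.drop (i + 2)) ['*', '/']).toNat + 2) := by omega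
                        rw [htn, ih (i + 2 + ((PySem.Chars.find (cs.drop (i + 2)) ['*', '/']).toNat + 2))
                          false false _ (by simp) (by omega)]
                        rw [hdrop, hdrop2, h3, h6]
                        simp [bGo, bGo_block, hg, List.drop_drop, -List.getElem_cons_drop]
                        have hgeq : PySem.Chars.find (cs.drop (i + 2)) ['*', '/'] =
                            ((PySem.Chars.find (cs.drop (i + 2)) ['*', '/']).toNat : Int) := by omega
                        rw [hgeq]
                        ring_nf
                        rw [max_eq_left (by omega)]
                    · rw [if_neg (by simp [h6]), ih (i + 1) false false spans (by simp) (by omega),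
                        hdrop, hdrop2]
                      simp [bGo, h3, h5, h6, -List.getElem_cons_drop]
                · have hd1 : cs.drop (i + 1) = [] := List.drop_eq_nil_of_le (by omega)
                  simp only [if_neg h4]
                  rw [if_neg (by simp), if_neg (by simp),
                    ih (i + 1) false false spans (by simp) (by omega), hdrop, hd1]
                  simp [bGo, h3, -List.getElem_cons_drop]
              · rw [if_neg (by simp [h3]), if_neg (by simp [h3]),
                  ih (i + 1) false false spans (by simp) (by omega), hdrop]
                simp [bGo, h1, h2, h3, -List.getElem_cons_drop]
    · have hd : cs.drop i = [] := List.drop_eq_nil_of_le (by omega)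
      simp only [aLoop, if_neg hi]
      cases instr <;> cases inchar <;> simp [bGo, hd, -List.getElem_cons_drop]

theorem main_eq (src : String) : find_comment_spans src = find_comment_spans_alt src := by
  have h := aLoop_eq_bGo src.toList (src.toList.length + 1) 0 false false [] (by simp) (by omega)
  simp only [Nat.cast_zero, List.drop_zero, if_false, Bool.false_eq_true] at h
  simp only [find_comment_spans, find_comment_spans_alt]
  rw [h]

-- ===== VERDICT (by name: the statement is the Claim_ definition above) =====
theorem find_comment_spans_spec : Claim_equal_find_comment_spans := by
  intro src _
  unfold Spec_find_comment_spans
  exact main_eq src
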